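-- pv_equiv track=rewrite | github.com/Konathalavenkat/Code-Daily | Leetcode/November_2024/Nov_16.py | resultsArray
-- ===== SOURCE A (Python) =====
-- from typing import List
--
-- def resultsArray(nums: List[int], k: int) -> List[int]:
--     res=[]
--     cnt=1
--     n=len(nums)
--     for i in range(1,k):
--         if(nums[i]-1 == nums[i-1]):
--             cnt+=1
--         else:
--             cnt=1
--     if(cnt>=k):
--         res.append(nums[k-1])
--     else:
--         res.append(-1)
--     for i in range(k,n):
--         if(nums[i]-1 == nums[i-1]):
--             cnt+=1
--         else:
--             cnt=1
--         if(cnt>=k):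
--             res.append(nums[i])
--         else:
--             res.append(-1)
--     return res
-- ===== SOURCE B (Python) =====
-- def resultsArray(nums, k):
--     n = len(nums)
--     pref = [0] * (n + 1)
--     for i in range(1, n):
--         pref[i + 1] = pref[i] + (0 if nums[i] - 1 == nums[i - 1] else 1)
--     res = []
--     for i in range(k - 1, n):
--         res.append(nums[i] if pref[i + 1] == pref[i - k + 2] else -1)
--     return res
-- ===== Notes on version B (the rewrite author's own statement) =====
-- stated objective: alternative
-- what changed: B marks where consecutiveness breaks, takes prefix sums of these break indicators, and decides each window by comparing two prefix-sum entries (no break inside the window), instead of A's resetting streak counter with a special-cased first window.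
-- outside the precondition, e.g. on resultsArray([5, 6], 0): A returns [6, 5, 6], B raises IndexError
import Mathlib
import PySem

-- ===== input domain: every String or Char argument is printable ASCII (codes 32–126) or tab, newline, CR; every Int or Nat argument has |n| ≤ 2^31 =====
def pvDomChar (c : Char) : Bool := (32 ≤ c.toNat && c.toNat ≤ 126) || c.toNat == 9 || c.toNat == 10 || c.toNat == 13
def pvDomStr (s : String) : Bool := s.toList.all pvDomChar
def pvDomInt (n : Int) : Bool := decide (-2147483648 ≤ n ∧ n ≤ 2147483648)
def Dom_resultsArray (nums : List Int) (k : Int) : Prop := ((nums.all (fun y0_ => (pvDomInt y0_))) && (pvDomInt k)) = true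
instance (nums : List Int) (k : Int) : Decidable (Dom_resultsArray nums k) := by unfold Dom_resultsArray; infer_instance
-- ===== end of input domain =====

-- B decides each window by comparing two prefix sums of break indicators instead of
-- A's resetting streak counter (objective: alternative).  Return-value equivalence only;
-- neither program mutates its arguments.

-- ===== PORT A =====
def aStep1 (nums : List Int) (cnt : Int) (i : Int) : Int :=
  if PySem.List.pyGetD nums i 0 - 1 = PySem.List.pyGetD nums (i - 1) 0 then cnt + 1 else 1

def aStep2 (nums : List Int) (k : Int) (st : List Int × Int) (i : Int) : List Int × Int :=
  let cnt := if PySem.List.pyGetD nums i 0 - 1 = PySem.List.pyGetD nums (i - 1) 0 then st.2 + 1 else 1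
  if cnt ≥ k then (st.1 ++ [PySem.List.pyGetD nums i 0], cnt) else (st.1 ++ [-1], cnt)

def resultsArray (nums : List Int) (k : Int) : List Int :=
  let n := PySem.List.len nums
  let cnt := (PySem.List.pyRange 1 k 1).foldl (aStep1 nums) 1
  let res : List Int := if cnt ≥ k then [PySem.List.pyGetD nums (k - 1) 0] else [-1]
  ((PySem.List.pyRange k n 1).foldl (aStep2 nums k) (res, cnt)).1

-- ===== PORT B =====
def bPref (nums : List Int) (pref : List Int) (i : Int) : List Int :=
  PySem.List.pySetD pref (i + 1)
    (PySem.List.pyGetD pref i 0 +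
      (if PySem.List.pyGetD nums i 0 - 1 = PySem.List.pyGetD nums (i - 1) 0 then 0 else 1))

def resultsArray_alt (nums : List Int) (k : Int) : List Int :=
  let n := PySem.List.len nums
  let pref := (PySem.List.pyRange 1 n 1).foldl (bPref nums) (List.replicate (n.toNat + 1) 0)
  (PySem.List.pyRange (k - 1) n 1).foldl
    (fun res i => res ++
      [if PySem.List.pyGetD pref (i + 1) 0 = PySem.List.pyGetD pref (i - k + 2) 0
        then PySem.List.pyGetD nums i 0 else -1])
    ([] : List Int)

-- ===== PRECONDITION & SPEC =====
-- Pre_ keeps the task's natural domain 1 ≤ k ≤ len(nums).  Outside it A raises IndexError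
-- (k > len(nums), k < 1 - len(nums), or empty nums) except for nonpositive k with
-- 1 - len(nums) ≤ k ≤ 0, a meaningless window size on which A returns a list assembled by
-- negative-index wraparound while B itself raises IndexError (pref[n+1-k] is out of range).
def Pre_resultsArray (nums : List Int) (k : Int) : Prop :=
  1 ≤ k ∧ k ≤ (nums.length : Int)
instance (nums : List Int) (k : Int) : Decidable (Pre_resultsArray nums k) := by
  unfold Pre_resultsArray; infer_instance

def pvWitness_resultsArray : List Int × Int := ([1, 2, 3, 5], 2)

def Spec_resultsArray (nums : List Int) (k : Int) (out : List Int) : Prop := out = resultsArray_alt nums k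
instance (nums : List Int) (k : Int) (out : List Int) : Decidable (Spec_resultsArray nums k out) := by unfold Spec_resultsArray; infer_instance

-- ===== CLAIM (what is proved, stated in full; the proofs are below) =====
def Claim_equal_resultsArray : Prop := ∀ (nums : List Int) (k : Int), Dom_resultsArray nums k → Pre_resultsArray nums k → Spec_resultsArray nums k (resultsArray nums k)

-- ===== LEMMAS AND PROOFS =====

-- the run length ending at index j (A's cnt when it sits at j)
def runAt (nums : List Int) : Nat → Int
  | 0 => 1
  | j + 1 => if nums.getD (j + 1) 0 - 1 = nums.getD j 0 then runAt nums j + 1 else 1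

-- break indicator: 1 iff consecutiveness breaks entering index j
def brkInd (nums : List Int) : Nat → Int
  | 0 => 0
  | j + 1 => if nums.getD (j + 1) 0 - 1 = nums.getD j 0 then 0 else 1

-- B's pref[j]
def prefAt (nums : List Int) : Nat → Int
  | 0 => 0
  | j + 1 => prefAt nums j + brkInd nums j

lemma runAt_pos (nums : List Int) (j : Nat) : 1 ≤ runAt nums j := by
  induction j with
  | zero => simp [runAt]
  | succ j ih => simp only [runAt]; split <;> omega

lemma brkInd_nonneg (nums : List Int) (j : Nat) : 0 ≤ brkInd nums j := by
  cases j with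
  | zero => simp [brkInd]
  | succ p => simp only [brkInd]; split <;> omega

lemma prefAt_mono (nums : List Int) {a b : Nat} (h : a ≤ b) :
    prefAt nums a ≤ prefAt nums b := by
  induction b with
  | zero => simp [Nat.le_zero.mp h]
  | succ b ih =>
    rcases Nat.lt_or_ge a (b + 1) with hlt | hge
    · have := ih (by omega)
      have := brkInd_nonneg nums b
      simp only [prefAt]; omega
    · have : a = b + 1 := by omega
      simp [this]

-- the bridge: a window of length c ending at i is consecutive iff no break inside it
lemma run_iff (nums : List Int) :
    ∀ (i c : Nat), 1 ≤ c → c ≤ i + 1 →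
      ((c : Int) ≤ runAt nums i ↔ prefAt nums (i + 2 - c) = prefAt nums (i + 1)) := by
  intro i
  induction i with
  | zero =>
    intro c h1 h2
    have hc : c = 1 := by omega
    subst hc
    simp [runAt]
  | succ i ih =>
    intro c h1 h2
    obtain _ | c := c
    · omega
    obtain _ | c' := c
    · have hpos := runAt_pos nums (i + 1)
      constructor
      · intro _
        exact congrArg (prefAt nums) (by omega)
      · intro _
        simpa using hpos
    · by_cases hcons : nums.getD (i + 1) 0 - 1 = nums.getD i 0
      · have hrun : runAt nums (i + 1) = runAt nums i + 1 := by
          simp only [runAt, if_pos hcons]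
        have hpref : prefAt nums (i + 2) = prefAt nums (i + 1) := by
          simp only [prefAt, brkInd, if_pos hcons]; omega
        have hih := ih (c' + 1) (by omega) (by omega)
        have hidx : i + 1 + 2 - (c' + 1 + 1) = i + 2 - (c' + 1) := by omega
        rw [hidx, hrun, show i + 1 + 1 = i + 2 from rfl, hpref]
        constructor
        · intro hle
          exact hih.mp (by push_cast at hle ⊢; omega)
        · intro heq
          have := hih.mpr heq
          push_cast at this ⊢
          omega
      · have hrun : runAt nums (i + 1) = 1 := by
          simp only [runAt, if_neg hcons]
        have hpref : prefAt nums (i + 2) = prefAt nums (i + 1) + 1 := by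
          simp only [prefAt, brkInd, if_neg hcons]
        have hm : prefAt nums (i + 1 + 2 - (c' + 1 + 1)) ≤ prefAt nums (i + 1) :=
          prefAt_mono nums (by omega)
        rw [hrun, show i + 1 + 1 = i + 2 from rfl]
        constructor
        · intro hle
          exfalso
          push_cast at hle
          omega
        · intro heq
          rw [heq] at hm
          omega

-- B's first loop builds exactly the list of prefAt values
lemma build_go (nums : List Int) :
    ∀ (j : Nat), 1 ≤ j → j ≤ nums.length → ∀ (m : Nat), nums.length - j = m →
      (PySem.List.pyRange (j : Int) (nums.length : Int) 1).foldl (bPref nums)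
          ((List.range (j + 1)).map (prefAt nums) ++ List.replicate (nums.length - j) 0) =
        (List.range (nums.length + 1)).map (prefAt nums) := by
  intro j hj1 hj2 m
  induction m generalizing j with
  | zero =>
    intro h
    have hje : j = nums.length := by omega
    subst hje
    have hr : PySem.List.pyRange (nums.length : Int) (nums.length : Int) 1 = [] := by
      rw [PySem.List.pyRange_one]
      simp
    rw [hr]
    simp
  | succ m ih =>
    intro h
    have hjl : j < nums.length := by omega
    rw [PySem.List.pyRange_one_cons (by exact_mod_cast hjl), List.foldl_cons]
    have hstep : bPref nums
        ((List.range (j + 1)).map (prefAt nums) ++ List.replicate (nums.length - j) 0) (j : Int)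
        = (List.range (j + 2)).map (prefAt nums) ++ List.replicate (nums.length - (j + 1)) 0 := by
      obtain ⟨p, hp⟩ : ∃ p : Nat, j = p + 1 := ⟨j - 1, by omega⟩
      subst hp
      have hget : PySem.List.pyGetD
          ((List.range (p + 2)).map (prefAt nums) ++ List.replicate (nums.length - (p + 1)) 0)
          ((p + 1 : Nat) : Int) 0 = prefAt nums (p + 1) := by
        rw [PySem.List.pyGetD_natCast]
        rw [List.getD_append _ _ _ _ (by simp)]
        simp [List.getD_eq_getElem?_getD]
      have hnums : PySem.List.pyGetD nums (((p + 1 : Nat) : Int) - 1) 0 = nums.getD p 0 := by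
        rw [show (((p + 1 : Nat) : Int) - 1) = ((p : Nat) : Int) by push_cast; ring,
          PySem.List.pyGetD_natCast]
      simp only [bPref, hget, hnums, PySem.List.pyGetD_natCast]
      rw [show ((p + 1 : Nat) : Int) + 1 = ((p + 2 : Nat) : Int) by push_cast; ring,
        PySem.List.pySetD_natCast]
      have hrep : List.replicate (nums.length - (p + 1)) (0 : Int)
          = 0 :: List.replicate (nums.length - (p + 2)) 0 := by
        rw [show nums.length - (p + 1) = (nums.length - (p + 2)) + 1 by omega]
        rfl
      rw [hrep, List.set_append_right _ _ (by simp)]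
      simp only [List.length_map, List.length_range]
      rw [show p + 2 - (p + 2) = 0 by omega]
      have hval : prefAt nums (p + 1) +
          (if nums.getD (p + 1) 0 - 1 = nums.getD p 0 then (0 : Int) else 1)
          = prefAt nums (p + 2) := by
        simp only [prefAt, brkInd]
      rw [List.set_cons_zero, hval,
        show List.range (p + 3) = List.range (p + 2) ++ [p + 2] from List.range_succ,
        List.map_append, List.map_singleton, List.append_assoc]
      rfl
    rw [hstep, show ((j : Int) + 1) = ((j + 1 : Nat) : Int) by push_cast; ring]
    exact ih (j + 1) (by omega) (by omega) (by omega)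

lemma build_pref (nums : List Int) :
    (PySem.List.pyRange 1 (nums.length : Int) 1).foldl (bPref nums)
        (List.replicate (nums.length + 1) 0) =
      (List.range (nums.length + 1)).map (prefAt nums) := by
  by_cases hn : nums.length = 0
  · rw [hn]
    rw [show PySem.List.pyRange 1 (((0 : Nat) : Int)) 1 = [] by decide]
    simp [prefAt]
  · have h := build_go nums 1 (by omega) (by omega) (nums.length - 1) rfl
    have hinit : (List.range (1 + 1)).map (prefAt nums) ++ List.replicate (nums.length - 1) (0 : Int)
        = List.replicate (nums.length + 1) 0 := by
      have h2 : (List.range (1 + 1)).map (prefAt nums) = [0, 0] := by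
        simp [List.range_succ, prefAt, brkInd]
      rw [h2, show nums.length + 1 = (nums.length - 1) + 2 by omega]
      simp [List.replicate_succ]
    rw [hinit, Nat.cast_one] at h
    exact h

-- A's first loop computes the run length at index m
lemma cntA_eq (nums : List Int) (m : Nat) (hm : m < nums.length) :
    (PySem.List.pyRange 1 ((m : Int) + 1) 1).foldl (aStep1 nums) 1 = runAt nums m := by
  induction m with
  | zero =>
    have h0 : PySem.List.pyRange 1 ((0 : Nat) + 1 : Int) 1 = [] := by decide
    rw [show ((0 : Nat) : Int) + 1 = ((0 : Nat) + 1 : Int) by norm_num, h0]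
    simp [runAt]
  | succ m ih =>
    have hcast : ((m + 1 : Nat) : Int) + 1 = ((m : Int) + 1) + 1 := by push_cast; ring
    rw [hcast, PySem.List.pyRange_one_succ_right (by omega), List.foldl_append,
      ih (by omega), List.foldl_cons, List.foldl_nil]
    have hgm : ((m : Int) + 1) - 1 = (m : Int) := by ring
    simp only [aStep1, hgm]
    rw [show ((m : Int) + 1) = ((m + 1 : Nat) : Int) by push_cast; ring]
    simp only [PySem.List.pyGetD_natCast]
    simp [runAt]

-- A's second loop appends the window results for indices k .. k+m-1
lemma foldA2 (nums : List Int) (k : Int) (hk : 1 ≤ k) :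
    ∀ (m : Nat), k + m ≤ (nums.length : Int) → ∀ (acc : List Int),
      (PySem.List.pyRange k (k + m) 1).foldl (aStep2 nums k) (acc, runAt nums (k - 1).toNat)
        = (acc ++ (PySem.List.pyRange k (k + m) 1).map
            (fun i => if runAt nums i.toNat ≥ k then PySem.List.pyGetD nums i 0 else -1),
           runAt nums (k + m - 1).toNat) := by
  intro m
  induction m with
  | zero =>
    intro _ acc
    have h0 : PySem.List.pyRange k (k + (0 : Nat)) 1 = [] := by
      rw [PySem.List.pyRange_one, show k + ((0 : Nat) : Int) - k = 0 by push_cast; ring]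
      simp
    simp only [h0, List.foldl_nil, List.map_nil, List.append_nil]
    norm_num
  | succ m ih =>
    intro hmn acc
    have hcast : k + ((m + 1 : Nat) : Int) = (k + (m : Nat)) + 1 := by push_cast; ring
    rw [hcast, PySem.List.pyRange_one_succ_right (by omega), List.foldl_append,
      ih (by omega) acc, List.foldl_cons, List.foldl_nil, List.map_append, List.map_singleton]
    have hlt : k + (m : Int) < (nums.length : Int) := by push_cast at hmn ⊢; omega
    have hcnt : (if PySem.List.pyGetD nums (k + (m : Int)) 0 - 1 =
          PySem.List.pyGetD nums (k + (m : Int) - 1) 0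
        then runAt nums (k + (m : Int) - 1).toNat + 1 else 1)
        = runAt nums (k + (m : Int)).toNat := by
      obtain ⟨p, hp⟩ : ∃ p : Nat, k + (m : Int) = (p : Int) + 1 :=
        ⟨(k + m - 1).toNat, by omega⟩
      have h3 : (k + (m : Int)).toNat = p + 1 := by omega
      have h4 : (k + (m : Int) - 1).toNat = p := by omega
      have h2 : (k + (m : Int) - 1) = ((p : Nat) : Int) := by omega
      have h1 : (k + (m : Int)) = ((p + 1 : Nat) : Int) := by push_cast; omega
      rw [h3, h4, h2, h1, PySem.List.pyGetD_natCast, PySem.List.pyGetD_natCast]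
      simp only [runAt]
    simp only [aStep2, hcnt]
    have hsnd : k + (m : Int) + 1 - 1 = k + (m : Int) := by ring
    rw [hsnd]
    by_cases hge : runAt nums (k + (m : Int)).toNat ≥ k
    · rw [if_pos hge, if_pos hge]
      simp [List.append_assoc]
    · rw [if_neg hge, if_neg hge]
      simp [List.append_assoc]

-- reading B's pref list at an in-range nonnegative index
lemma pref_getD (nums : List Int) (i : Int) (h0 : 0 ≤ i) (h1 : i ≤ (nums.length : Int)) :
    PySem.List.pyGetD ((List.range (nums.length + 1)).map (prefAt nums)) i 0
      = prefAt nums i.toNat := by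
  have hlen : i < (((List.range (nums.length + 1)).map (prefAt nums)).length : Int) := by
    simp; omega
  rw [PySem.List.pyGetD_eq_getElem _ 0 h0 hlen]
  simp [List.getElem_map]

-- B's window condition agrees with A's run-length test
lemma cond_eq (nums : List Int) (k i : Int) (hk : 1 ≤ k) (hik : k - 1 ≤ i)
    (hin : i < (nums.length : Int)) :
    (PySem.List.pyGetD ((List.range (nums.length + 1)).map (prefAt nums)) (i + 1) 0
        = PySem.List.pyGetD ((List.range (nums.length + 1)).map (prefAt nums)) (i - k + 2) 0)
      ↔ runAt nums i.toNat ≥ k := by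
  rw [pref_getD nums (i + 1) (by omega) (by omega),
    pref_getD nums (i - k + 2) (by omega) (by omega)]
  have h1 : (i + 1).toNat = i.toNat + 1 := by omega
  have h2 : (i - k + 2).toNat = i.toNat + 2 - k.toNat := by omega
  rw [h1, h2]
  have hiff := run_iff nums i.toNat k.toNat (by omega) (by omega)
  have hkc : ((k.toNat : Nat) : Int) = k := by omega
  rw [hkc] at hiff
  constructor
  · intro h; exact hiff.mpr h.symm
  · intro h; exact (hiff.mp h).symm

-- ===== VERDICT (by name: the statement is the Claim_ definition above) =====
theorem resultsArray_spec : Claim_equal_resultsArray := by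
  intro nums k _ hpre
  obtain ⟨hk1, hk2⟩ := hpre
  unfold Spec_resultsArray
  simp only [resultsArray, resultsArray_alt, PySem.List.len_eq, Int.toNat_natCast, build_pref]
  -- A's first window
  have hm : k = (((k - 1).toNat : Nat) : Int) + 1 := by omega
  have hcnt : (PySem.List.pyRange 1 k 1).foldl (aStep1 nums) 1 = runAt nums (k - 1).toNat := by
    have h := cntA_eq nums (k - 1).toNat (by omega)
    rw [← hm] at h
    exact h
  rw [hcnt]
  -- A's second loop
  have hkm : k + ((((nums.length : Int) - k).toNat : Nat) : Int) = (nums.length : Int) := by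
    omega
  have hA := foldA2 nums k hk1 ((nums.length : Int) - k).toNat (by omega)
    (if runAt nums (k - 1).toNat ≥ k then [PySem.List.pyGetD nums (k - 1) 0] else [-1])
  rw [hkm] at hA
  rw [hA]
  -- B's loop as a map, split off the first window
  rw [PySem.List.foldl_append_singleton_eq_map, List.nil_append,
    PySem.List.pyRange_one_cons (by omega : k - 1 < (nums.length : Int)),
    show k - 1 + 1 = k by ring, List.map_cons]
  rw [show k - 1 + 1 = k by ring, show k - 1 - k + 2 = (1 : Int) by ring]
  have hhead := cond_eq nums k (k - 1) hk1 (by omega) (by omega)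
  rw [show k - 1 + 1 = k by ring, show k - 1 - k + 2 = (1 : Int) by ring] at hhead
  have hmapB : List.map
      (fun i => if PySem.List.pyGetD ((List.range (nums.length + 1)).map (prefAt nums)) (i + 1) 0
            = PySem.List.pyGetD ((List.range (nums.length + 1)).map (prefAt nums)) (i - k + 2) 0
          then PySem.List.pyGetD nums i 0 else -1)
        (PySem.List.pyRange k (nums.length : Int) 1)
      = List.map (fun i => if runAt nums i.toNat ≥ k then PySem.List.pyGetD nums i 0 else -1)
        (PySem.List.pyRange k (nums.length : Int) 1) :=
    List.map_congr_left (fun i hi => by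
      have hb := PySem.List.mem_pyRange_one.mp hi
      have := cond_eq nums k i hk1 (by omega) (by omega)
      by_cases hc : runAt nums i.toNat ≥ k
      · rw [if_pos hc, if_pos (this.mpr hc)]
      · rw [if_neg hc, if_neg (fun h => hc (this.mp h))])
  rw [hmapB]
  by_cases hh : runAt nums (k - 1).toNat ≥ k
  · rw [if_pos hh, if_pos (hhead.mpr hh)]
    simp
  · rw [if_neg hh, if_neg (fun h => hh (hhead.mp h))]
    simp
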